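-- pv_equiv track=rewrite | github.com/mautonomy/Projector_homework | 1_month/game.dict.py | get_subjects_not_passed_by_all_students
-- ===== SOURCE A (Python) =====
-- def get_list_by_key(data: dict, key: str) -> list:
--         result = []
--
--         if key in data.keys():
--                 result = data[key]
--         else:
--                 data[key] = result
--
--         return result
--
-- def get_subjects_not_passed_by_all_students(student_exams):
--         processed_exams = {}
--         for exam in student_exams:
--                 get_list_by_key(processed_exams, exam[2]).append(exam[1])
--
--         problematic_subjects = set()
--         for subject in processed_exams.keys():
--                 if min(processed_exams[subject]) <= 60:
--                         problematic_subjects.add(subject)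
--
--         return problematic_subjects
-- ===== SOURCE B (Python) =====
-- def get_subjects_not_passed_by_all_students(student_exams):
--     # One pass: track, per subject, whether any grade seen so far is <= 60.
--     any_fail = {}
--     for exam in student_exams:
--         any_fail[exam[2]] = any_fail.get(exam[2], False) or exam[1] <= 60
--     return {subject for subject, fail in any_fail.items() if fail}
-- ===== Notes on version B (the rewrite author's own statement) =====
-- stated objective: simpler
-- what changed: B drops the get_list_by_key helper, the per-subject grade lists and the min() scans: one pass keeps a single boolean flag per subject ('any grade <= 60 so far'), then the flagged subjects form the result set.
import Mathlib
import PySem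

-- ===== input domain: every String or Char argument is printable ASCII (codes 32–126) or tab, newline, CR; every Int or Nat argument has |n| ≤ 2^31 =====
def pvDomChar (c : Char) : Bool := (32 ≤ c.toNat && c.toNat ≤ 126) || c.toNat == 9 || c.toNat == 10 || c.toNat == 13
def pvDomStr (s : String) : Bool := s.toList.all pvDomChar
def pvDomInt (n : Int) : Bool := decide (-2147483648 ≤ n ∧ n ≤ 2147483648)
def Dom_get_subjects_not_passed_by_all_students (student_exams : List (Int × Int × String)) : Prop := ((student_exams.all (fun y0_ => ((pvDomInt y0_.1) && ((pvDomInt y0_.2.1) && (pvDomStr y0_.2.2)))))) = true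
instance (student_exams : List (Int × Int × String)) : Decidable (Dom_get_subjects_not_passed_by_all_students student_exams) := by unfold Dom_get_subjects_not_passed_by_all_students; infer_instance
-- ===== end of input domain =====

-- B replaces A's grouping of grade lists + per-subject min() by a single pass keeping
-- one boolean flag per subject (any grade <= 60 so far); objective: simpler.


-- ===== PORT A =====
-- get_list_by_key(d, k).append(v) groups v under key k (existing list, or a fresh
-- one inserted for k): exactly Dict.modify k [] (· ++ [v]).
def get_subjects_not_passed_by_all_students (student_exams : List (Int × Int × String)) : List String :=
  let processed_exams : PySem.Dict String (List Int) :=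
    student_exams.foldl (fun d exam => d.modify exam.2.2 [] (fun l => l ++ [exam.2.1])) PySem.Dict.empty
  -- min([]) would be a ValueError (none branch), but every key's list is nonempty, so it is unreachable
  processed_exams.keys.foldl (fun s subject =>
    match PySem.List.min? (processed_exams.getD subject []) (fun x => x) with
    | some m => if m ≤ 60 then PySem.Set.add s subject else s
    | none => s) PySem.Set.empty

-- ===== PORT B =====
-- any_fail[k] = any_fail.get(k, False) or (grade <= 60)  is  Dict.modify k false (· || …)
def get_subjects_not_passed_by_all_students_alt (student_exams : List (Int × Int × String)) : List String :=
  let any_fail : PySem.Dict String Bool :=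
    student_exams.foldl (fun d exam => d.modify exam.2.2 false (fun b => b || decide (exam.2.1 ≤ 60))) PySem.Dict.empty
  PySem.Set.ofList ((any_fail.items.filter (fun p => p.2)).map (fun p => p.1))

-- ===== PRECONDITION & SPEC =====
def Spec_get_subjects_not_passed_by_all_students (student_exams : List (Int × Int × String)) (out : List String) : Prop := out = get_subjects_not_passed_by_all_students_alt student_exams
instance (student_exams : List (Int × Int × String)) (out : List String) : Decidable (Spec_get_subjects_not_passed_by_all_students student_exams out) := by unfold Spec_get_subjects_not_passed_by_all_students; infer_instance

-- ===== CLAIM (what is proved, stated in full; the proofs are below) =====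
def Claim_equal_get_subjects_not_passed_by_all_students : Prop := ∀ (student_exams : List (Int × Int × String)), Dom_get_subjects_not_passed_by_all_students student_exams → Spec_get_subjects_not_passed_by_all_students student_exams (get_subjects_not_passed_by_all_students student_exams)

-- ===== LEMMAS AND PROOFS =====

-- min(ys) ≤ 60, as A tests it, is just "some element ≤ 60"
theorem pv_min_le_iff_any (ys : List Int) :
    (match PySem.List.min? ys (fun x => x) with
     | some m => if m ≤ 60 then true else false
     | none => false) = ys.any (fun g => g ≤ 60) := by
  cases h : PySem.List.min? ys (fun x => x) with
  | none =>
      rw [PySem.List.min?_eq_none_iff] at h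
      subst h; rfl
  | some m =>
      have hmem := PySem.List.min?_mem h
      have hmin := PySem.List.min?_isMin h
      by_cases hle : m ≤ 60
      · simp only [hle, if_true]
        exact (List.any_eq_true.mpr ⟨m, hmem, by simpa using hle⟩).symm
      · simp only [hle, if_false]
        symm
        simp only [List.any_eq_false]
        intro g hg
        have := hmin g hg
        simp only [decide_eq_true_eq] at *
        omega

-- a conditional-add fold from a nodup, disjoint start is append-filter
theorem pv_foldl_add_filter (C : String → Bool) :
    ∀ (l : List String) (acc : PySem.Set String), l.Nodup → (∀ x ∈ l, x ∉ acc) →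
      l.foldl (fun s k => if C k then PySem.Set.add s k else s) acc = acc ++ l.filter C := by
  intro l
  induction l with
  | nil => intro acc _ _; simp
  | cons k t ih =>
      intro acc hnd hdisj
      have hk : k ∉ acc := hdisj k (List.mem_cons_self ..)
      have hnd' := (List.nodup_cons.mp hnd)
      have hstep : ∀ x ∈ t, x ∉ PySem.Set.add acc k := by
        intro x hx
        have hxk : x ≠ k := by rintro rfl; exact hnd'.1 hx
        simp [PySem.Set.mem_add, hxk, hdisj x (List.mem_cons_of_mem _ hx)]
      by_cases hC : C k = true
      · simp only [List.foldl_cons, hC, if_true]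
        rw [ih (PySem.Set.add acc k) hnd'.2 hstep]
        have : PySem.Set.add acc k = acc ++ [k] := by
          simp [PySem.Set.add, hk]
        simp [this, hC]
      · have hC' : C k = false := by simpa using hC
        simp only [List.foldl_cons, hC', Bool.false_eq_true, if_false]
        rw [ih acc hnd'.2 (fun x hx => hdisj x (List.mem_cons_of_mem _ hx))]
        simp [hC']

-- B's flag fold: the flag of s is "any exam with subject s has grade ≤ 60"
theorem pv_getD_flag_fold :
    ∀ (l : List (Int × Int × String)) (d : PySem.Dict String Bool) (s : String),
      (l.foldl (fun d exam => d.modify exam.2.2 false (fun b => b || decide (exam.2.1 ≤ 60))) d).getD s false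
        = (d.getD s false || (l.filter (fun e => e.2.2 == s)).any (fun e => decide (e.2.1 ≤ 60))) := by
  intro l
  induction l with
  | nil => intro d s; simp
  | cons e t ih =>
      intro d s
      simp only [List.foldl_cons]
      rw [ih]
      rw [PySem.Dict.getD_modify]
      by_cases h : e.2.2 = s
      · simp [h, Bool.or_assoc]
      · have h' : ¬ (s = e.2.2) := fun hh => h hh.symm
        simp [h, h']

theorem get_subjects_spec_aux (student_exams : List (Int × Int × String)) :
    get_subjects_not_passed_by_all_students student_exams
      = get_subjects_not_passed_by_all_students_alt student_exams := by
  unfold get_subjects_not_passed_by_all_students get_subjects_not_passed_by_all_students_alt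
  simp only []
  set xs := student_exams
  set processed : PySem.Dict String (List Int) :=
    xs.foldl (fun d exam => d.modify exam.2.2 [] (fun l => l ++ [exam.2.1])) PySem.Dict.empty with hproc
  set any_fail : PySem.Dict String Bool :=
    xs.foldl (fun d exam => d.modify exam.2.2 false (fun b => b || decide (exam.2.1 ≤ 60))) PySem.Dict.empty with hflag
  -- both dicts carry the subjects as keys, in first-appearance order
  have hkeysA : processed.keys = PySem.Set.ofList (xs.map (fun exam => exam.2.2)) := by
    rw [hproc, PySem.Dict.keys_foldl_modify_key xs (fun exam => exam.2.2) []
      (fun _ exam => fun l => l ++ [exam.2.1]) PySem.Dict.empty]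
    simp [PySem.Set.update_nil_left]
  have hkeysB : any_fail.keys = PySem.Set.ofList (xs.map (fun exam => exam.2.2)) := by
    rw [hflag, PySem.Dict.keys_foldl_modify_key xs (fun exam => exam.2.2) false
      (fun _ exam => fun b => b || decide (exam.2.1 ≤ 60)) PySem.Dict.empty]
    simp [PySem.Set.update_nil_left]
  have hndB : any_fail.keys.Nodup := by rw [hkeysB]; exact PySem.Set.nodup_ofList _
  have hndA : processed.keys.Nodup := by rw [hkeysA]; exact PySem.Set.nodup_ofList _
  -- each subject's grade list on A's side
  have hgetD : ∀ s, processed.getD s [] = ((xs.filter (fun e => e.2.2 == s)).map (fun e => e.2.1)) := by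
    intro s
    have : processed = (xs.map (fun e => (e.2.2, e.2.1))).foldl
        (fun d p => d.modify p.1 [] (fun l => l ++ [p.2])) PySem.Dict.empty := by
      rw [hproc, List.foldl_map]
    rw [this, PySem.Dict.getD_foldl_modify_append]
    simp [List.filter_map, List.map_map, Function.comp_def]
  -- each subject's flag on B's side
  have hflagD : ∀ s, any_fail.getD s false
      = (xs.filter (fun e => e.2.2 == s)).any (fun e => decide (e.2.1 ≤ 60)) := by
    intro s
    rw [hflag, pv_getD_flag_fold]
    simp
  -- A's loop is a filter over its keys
  set C : String → Bool := fun k =>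
    match PySem.List.min? (processed.getD k []) (fun x => x) with
    | some m => if m ≤ 60 then true else false
    | none => false with hC
  have hbody : (fun (s : PySem.Set String) (subject : String) =>
      match PySem.List.min? (processed.getD subject []) (fun x => x) with
      | some m => if m ≤ 60 then PySem.Set.add s subject else s
      | none => s)
      = fun s k => if C k then PySem.Set.add s k else s := by
    funext s k
    rw [hC]
    cases h : PySem.List.min? (processed.getD k []) (fun x => x) with
    | none => simp [h]
    | some m => by_cases hle : m ≤ 60 <;> simp [h, hle]
  rw [hbody, pv_foldl_add_filter C processed.keys PySem.Set.empty hndA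
    (by intro x _ hx; simp [PySem.Set.empty] at hx)]
  -- B's set comprehension is a filter over its keys
  rw [PySem.Dict.items_eq_map_keys any_fail hndB false]
  have hfilterB : (((any_fail.keys.map (fun k => (k, any_fail.getD k false))).filter
        (fun p => p.2)).map (fun p => p.1))
      = any_fail.keys.filter (fun k => any_fail.getD k false) := by
    rw [List.filter_map, List.map_map]
    simp [Function.comp_def]
  rw [hfilterB]
  rw [PySem.Set.ofList_eq_self_of_nodup _ (hndB.filter _)]
  rw [hkeysA, hkeysB]
  simp only [PySem.Set.empty, List.nil_append]
  apply List.filter_congr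
  intro s _
  rw [hC]
  simp only []
  rw [hgetD s, pv_min_le_iff_any, hflagD s, List.any_map]
  rfl

-- ===== VERDICT (by name: the statement is the Claim_ definition above) =====
theorem get_subjects_not_passed_by_all_students_spec : Claim_equal_get_subjects_not_passed_by_all_students := by
  intro xs _
  unfold Spec_get_subjects_not_passed_by_all_students
  exact get_subjects_spec_aux xs
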